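-- pv_equiv track=rewrite | github.com/inspireambitions/sauditravelandleisure.com | tools/repair_site.py | category_replacement
-- ===== SOURCE A (Python) =====
-- def category_replacement(path: str) -> str:
--     path_l = path.lower()
--     mappings = [
--         ("/category/saudi-arabia/riyadh/", "/riyadh/"),
--         ("/category/saudi-arabia/jeddah/", "/jeddah/"),
--         ("/category/saudi-arabia/alula/", "/alula/"),
--         ("/category/saudi-arabia/makkah/", "/makkah-madinah/"),
--         ("/category/saudi-arabia/madinah/", "/makkah-madinah/"),
--         ("/category/saudi-arabia/", "/saudi-destinations/"),
--         ("/category/food-and-drink/", "/saudi-food-and-culture/"),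
--         ("/category/culture/", "/saudi-food-and-culture/"),
--         ("/category/travel-tips/", "/saudi-travel-basics/"),
--         ("/category/things-to-do/", "/saudi-destinations/"),
--         ("/category/places-to-stay/", "/saudi-destinations/"),
--         ("/category/gulf/", "/"),
--         ("/category/united-arab-emirates/", "/"),
--         ("/category/united-ar-emirates/", "/"),
--     ]
--     for prefix, replacement in mappings:
--         if path_l.startswith(prefix):
--             return replacement
--     return "/"
-- ===== SOURCE B (Python) =====
-- def category_replacement(path: str) -> str:
--     path_l = path.lower()
--     mappings = [
--         ("/category/saudi-arabia/riyadh/", "/riyadh/"),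
--         ("/category/saudi-arabia/jeddah/", "/jeddah/"),
--         ("/category/saudi-arabia/alula/", "/alula/"),
--         ("/category/saudi-arabia/makkah/", "/makkah-madinah/"),
--         ("/category/saudi-arabia/madinah/", "/makkah-madinah/"),
--         ("/category/saudi-arabia/", "/saudi-destinations/"),
--         ("/category/food-and-drink/", "/saudi-food-and-culture/"),
--         ("/category/culture/", "/saudi-food-and-culture/"),
--         ("/category/travel-tips/", "/saudi-travel-basics/"),
--         ("/category/things-to-do/", "/saudi-destinations/"),
--         ("/category/places-to-stay/", "/saudi-destinations/"),
--         ("/category/gulf/", "/"),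
--         ("/category/united-arab-emirates/", "/"),
--         ("/category/united-ar-emirates/", "/"),
--     ]
--     best_len = 0
--     best = "/"
--     for prefix, replacement in mappings:
--         if path_l.startswith(prefix) and len(prefix) > best_len:
--             best_len = len(prefix)
--             best = replacement
--     return best
-- ===== Notes on version B (the rewrite author's own statement) =====
-- stated objective: alternative
-- what changed: Replaces A's early-return first-match scan over a priority-ordered prefix list by an order-independent longest-prefix-match fold (track best_len/best over all pairs); equal because every specific prefix is strictly longer than the generic one it extends and all other prefixes are pairwise incomparable.
import Mathlib
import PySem

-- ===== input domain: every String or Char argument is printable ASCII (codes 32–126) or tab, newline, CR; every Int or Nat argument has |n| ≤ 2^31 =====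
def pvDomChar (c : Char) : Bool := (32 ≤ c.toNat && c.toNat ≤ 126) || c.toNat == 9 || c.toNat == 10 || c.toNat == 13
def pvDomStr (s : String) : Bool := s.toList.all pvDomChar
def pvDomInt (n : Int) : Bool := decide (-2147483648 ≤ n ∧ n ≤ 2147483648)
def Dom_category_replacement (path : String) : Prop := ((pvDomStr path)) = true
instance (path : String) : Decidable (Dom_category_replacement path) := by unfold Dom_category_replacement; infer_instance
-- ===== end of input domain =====

-- B replaces A's first-match-in-priority-order scan with an order-independent longest-prefix-match fold (alternative decomposition, same cost).

-- the shared constant table of (prefix, replacement) pairs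
def crMappings : List (String × String) :=
  [ ("/category/saudi-arabia/riyadh/", "/riyadh/"),
    ("/category/saudi-arabia/jeddah/", "/jeddah/"),
    ("/category/saudi-arabia/alula/", "/alula/"),
    ("/category/saudi-arabia/makkah/", "/makkah-madinah/"),
    ("/category/saudi-arabia/madinah/", "/makkah-madinah/"),
    ("/category/saudi-arabia/", "/saudi-destinations/"),
    ("/category/food-and-drink/", "/saudi-food-and-culture/"),
    ("/category/culture/", "/saudi-food-and-culture/"),
    ("/category/travel-tips/", "/saudi-travel-basics/"),
    ("/category/things-to-do/", "/saudi-destinations/"),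
    ("/category/places-to-stay/", "/saudi-destinations/"),
    ("/category/gulf/", "/"),
    ("/category/united-arab-emirates/", "/"),
    ("/category/united-ar-emirates/", "/") ]

-- ===== PORT A =====
-- A's for-loop with early return, as structural recursion over the mapping list
def crLoopA (pathL : String) : List (String × String) → String
  | [] => "/"
  | (prefix_, replacement) :: rest =>
      if PySem.Str.startswith pathL prefix_ then replacement else crLoopA pathL rest

def category_replacement (path : String) : String :=
  crLoopA (PySem.Str.lower path) crMappings

-- ===== PORT B =====
-- B's fold step: keep the longest matching prefix seen so far
def crStepB (pathL : String) (acc : Int × String) (pr : String × String) : Int × String :=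
  if PySem.Str.startswith pathL pr.1 && decide (PySem.Str.len pr.1 > acc.1) then
    (PySem.Str.len pr.1, pr.2)
  else acc

def category_replacement_alt (path : String) : String :=
  ((crMappings.foldl (crStepB (PySem.Str.lower path)) ((0 : Int), "/")).2)

-- ===== PRECONDITION & SPEC =====
def Spec_category_replacement (path : String) (out : String) : Prop := out = category_replacement_alt path
instance (path : String) (out : String) : Decidable (Spec_category_replacement path out) := by unfold Spec_category_replacement; infer_instance

-- ===== CLAIM (what is proved, stated in full; the proofs are below) =====
def Claim_equal_category_replacement : Prop := ∀ (path : String), Dom_category_replacement path → Spec_category_replacement path (category_replacement path)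

-- ===== LEMMAS AND PROOFS =====

-- if p matches l and q is incomparable with p, then q does not match l
theorem cr_not_sw {l p q : String} (h : PySem.Str.startswith l p = true)
    (hpq : ¬ (p.toList <+: q.toList)) (hqp : ¬ (q.toList <+: p.toList)) :
    PySem.Str.startswith l q = false := by
  rw [← Bool.not_eq_true]
  intro hq
  rw [PySem.Str.startswith_eq, PySem.Chars.startswith_iff] at h hq
  rcases le_total p.toList.length q.toList.length with hle | hle
  · exact hpq (List.prefix_of_prefix_length_le h hq hle)
  · exact hqp (List.prefix_of_prefix_length_le hq h hle)

theorem cr_core (l : String) :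
    crLoopA l crMappings = (crMappings.foldl (crStepB l) ((0 : Int), "/")).2 := by
  by_cases h1 : PySem.Str.startswith l "/category/saudi-arabia/riyadh/" = true
  case pos =>
    have h1_5 : PySem.Str.startswith l "/category/saudi-arabia/madinah/" = false := cr_not_sw h1 (by decide) (by decide)
    have h1_13 : PySem.Str.startswith l "/category/united-arab-emirates/" = false := cr_not_sw h1 (by decide) (by decide)
    simp [crMappings, crLoopA, crStepB, -PySem.Str.startswith_eq, h1, h1_5, h1_13]
  case neg =>
  by_cases h2 : PySem.Str.startswith l "/category/saudi-arabia/jeddah/" = true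
  case pos =>
    have h2_5 : PySem.Str.startswith l "/category/saudi-arabia/madinah/" = false := cr_not_sw h2 (by decide) (by decide)
    have h2_13 : PySem.Str.startswith l "/category/united-arab-emirates/" = false := cr_not_sw h2 (by decide) (by decide)
    simp [crMappings, crLoopA, crStepB, -PySem.Str.startswith_eq, h1, h2, h2_5, h2_13]
  case neg =>
  by_cases h3 : PySem.Str.startswith l "/category/saudi-arabia/alula/" = true
  case pos =>
    have h3_4 : PySem.Str.startswith l "/category/saudi-arabia/makkah/" = false := cr_not_sw h3 (by decide) (by decide)
    have h3_5 : PySem.Str.startswith l "/category/saudi-arabia/madinah/" = false := cr_not_sw h3 (by decide) (by decide)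
    have h3_13 : PySem.Str.startswith l "/category/united-arab-emirates/" = false := cr_not_sw h3 (by decide) (by decide)
    simp [crMappings, crLoopA, crStepB, -PySem.Str.startswith_eq, h1, h2, h3, h3_4, h3_5, h3_13]
  case neg =>
  by_cases h4 : PySem.Str.startswith l "/category/saudi-arabia/makkah/" = true
  case pos =>
    have h4_5 : PySem.Str.startswith l "/category/saudi-arabia/madinah/" = false := cr_not_sw h4 (by decide) (by decide)
    have h4_13 : PySem.Str.startswith l "/category/united-arab-emirates/" = false := cr_not_sw h4 (by decide) (by decide)
    simp [crMappings, crLoopA, crStepB, -PySem.Str.startswith_eq, h1, h2, h3, h4, h4_5, h4_13]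
  case neg =>
  by_cases h5 : PySem.Str.startswith l "/category/saudi-arabia/madinah/" = true
  case pos =>
    simp [crMappings, crLoopA, crStepB, -PySem.Str.startswith_eq, h1, h2, h3, h4, h5]
  case neg =>
  by_cases h6 : PySem.Str.startswith l "/category/saudi-arabia/" = true
  case pos =>
    have h6_7 : PySem.Str.startswith l "/category/food-and-drink/" = false := cr_not_sw h6 (by decide) (by decide)
    have h6_11 : PySem.Str.startswith l "/category/places-to-stay/" = false := cr_not_sw h6 (by decide) (by decide)
    have h6_13 : PySem.Str.startswith l "/category/united-arab-emirates/" = false := cr_not_sw h6 (by decide) (by decide)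
    have h6_14 : PySem.Str.startswith l "/category/united-ar-emirates/" = false := cr_not_sw h6 (by decide) (by decide)
    simp [crMappings, crLoopA, crStepB, -PySem.Str.startswith_eq, h1, h2, h3, h4, h5, h6, h6_7, h6_11, h6_13, h6_14]
  case neg =>
  by_cases h7 : PySem.Str.startswith l "/category/food-and-drink/" = true
  case pos =>
    have h7_13 : PySem.Str.startswith l "/category/united-arab-emirates/" = false := cr_not_sw h7 (by decide) (by decide)
    have h7_14 : PySem.Str.startswith l "/category/united-ar-emirates/" = false := cr_not_sw h7 (by decide) (by decide)
    simp [crMappings, crLoopA, crStepB, -PySem.Str.startswith_eq, h1, h2, h3, h4, h5, h6, h7, h7_13, h7_14]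
  case neg =>
  by_cases h8 : PySem.Str.startswith l "/category/culture/" = true
  case pos =>
    have h8_9 : PySem.Str.startswith l "/category/travel-tips/" = false := cr_not_sw h8 (by decide) (by decide)
    have h8_10 : PySem.Str.startswith l "/category/things-to-do/" = false := cr_not_sw h8 (by decide) (by decide)
    have h8_11 : PySem.Str.startswith l "/category/places-to-stay/" = false := cr_not_sw h8 (by decide) (by decide)
    have h8_13 : PySem.Str.startswith l "/category/united-arab-emirates/" = false := cr_not_sw h8 (by decide) (by decide)
    have h8_14 : PySem.Str.startswith l "/category/united-ar-emirates/" = false := cr_not_sw h8 (by decide) (by decide)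
    simp [crMappings, crLoopA, crStepB, -PySem.Str.startswith_eq, h1, h2, h3, h4, h5, h6, h7, h8, h8_9, h8_10, h8_11, h8_13, h8_14]
  case neg =>
  by_cases h9 : PySem.Str.startswith l "/category/travel-tips/" = true
  case pos =>
    have h9_10 : PySem.Str.startswith l "/category/things-to-do/" = false := cr_not_sw h9 (by decide) (by decide)
    have h9_11 : PySem.Str.startswith l "/category/places-to-stay/" = false := cr_not_sw h9 (by decide) (by decide)
    have h9_13 : PySem.Str.startswith l "/category/united-arab-emirates/" = false := cr_not_sw h9 (by decide) (by decide)
    have h9_14 : PySem.Str.startswith l "/category/united-ar-emirates/" = false := cr_not_sw h9 (by decide) (by decide)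
    simp [crMappings, crLoopA, crStepB, -PySem.Str.startswith_eq, h1, h2, h3, h4, h5, h6, h7, h8, h9, h9_10, h9_11, h9_13, h9_14]
  case neg =>
  by_cases h10 : PySem.Str.startswith l "/category/things-to-do/" = true
  case pos =>
    have h10_11 : PySem.Str.startswith l "/category/places-to-stay/" = false := cr_not_sw h10 (by decide) (by decide)
    have h10_13 : PySem.Str.startswith l "/category/united-arab-emirates/" = false := cr_not_sw h10 (by decide) (by decide)
    have h10_14 : PySem.Str.startswith l "/category/united-ar-emirates/" = false := cr_not_sw h10 (by decide) (by decide)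
    simp [crMappings, crLoopA, crStepB, -PySem.Str.startswith_eq, h1, h2, h3, h4, h5, h6, h7, h8, h9, h10, h10_11, h10_13, h10_14]
  case neg =>
  by_cases h11 : PySem.Str.startswith l "/category/places-to-stay/" = true
  case pos =>
    have h11_13 : PySem.Str.startswith l "/category/united-arab-emirates/" = false := cr_not_sw h11 (by decide) (by decide)
    have h11_14 : PySem.Str.startswith l "/category/united-ar-emirates/" = false := cr_not_sw h11 (by decide) (by decide)
    simp [crMappings, crLoopA, crStepB, -PySem.Str.startswith_eq, h1, h2, h3, h4, h5, h6, h7, h8, h9, h10, h11, h11_13, h11_14]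
  case neg =>
  by_cases h12 : PySem.Str.startswith l "/category/gulf/" = true
  case pos =>
    have h12_13 : PySem.Str.startswith l "/category/united-arab-emirates/" = false := cr_not_sw h12 (by decide) (by decide)
    have h12_14 : PySem.Str.startswith l "/category/united-ar-emirates/" = false := cr_not_sw h12 (by decide) (by decide)
    simp [crMappings, crLoopA, crStepB, -PySem.Str.startswith_eq, h1, h2, h3, h4, h5, h6, h7, h8, h9, h10, h11, h12, h12_13, h12_14]
  case neg =>
  by_cases h13 : PySem.Str.startswith l "/category/united-arab-emirates/" = true
  case pos =>
    simp [crMappings, crLoopA, crStepB, -PySem.Str.startswith_eq, h1, h2, h3, h4, h5, h6, h7, h8, h9, h10, h11, h12, h13]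
  case neg =>
  by_cases h14 : PySem.Str.startswith l "/category/united-ar-emirates/" = true
  case pos =>
    simp [crMappings, crLoopA, crStepB, -PySem.Str.startswith_eq, h1, h2, h3, h4, h5, h6, h7, h8, h9, h10, h11, h12, h13, h14]
  case neg =>
  simp [crMappings, crLoopA, crStepB, -PySem.Str.startswith_eq, h1, h2, h3, h4, h5, h6, h7, h8, h9, h10, h11, h12, h13, h14]

-- ===== VERDICT (by name: the statement is the Claim_ definition above) =====
theorem category_replacement_spec : Claim_equal_category_replacement := by
  intro path _
  unfold Spec_category_replacement category_replacement category_replacement_alt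
  exact cr_core (PySem.Str.lower path)
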